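-- pv_equiv track=rewrite | github.com/Happy-ryan/PS | 백준/Silver/14235. 크리스마스 선물/크리스마스 선물.py | solution
-- ===== SOURCE A (Python) =====
-- from heapq import heappush, heappop
--
-- def solution(n, presents):
--     heap = []
--     answer = ""
--     for row in presents:
--         if row[0] == 0:
--             if len(heap) == 0:
--                 answer += "-1\n"
--             else:
--                 answer += f"{-heappop(heap)}\n"
--         else:
--             for present in row[1:]:
--                 heappush(heap, -present)
--     return answer[:-1]
-- ===== SOURCE B (Python) =====
-- from bisect import insort
--
-- def solution(n, presents):
--     lst = []  # gifts kept in ascending sorted order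
--     answer = ""
--     for row in presents:
--         if row[0] == 0:
--             if lst:
--                 answer += f"{lst.pop()}\n"
--             else:
--                 answer += "-1\n"
--         else:
--             for present in row[1:]:
--                 insort(lst, present)
--     return answer[:-1]
-- ===== Notes on version B (the rewrite author's own statement) =====
-- stated objective: alternative
-- what changed: Replaces the negated max-heap (heappush/heappop with sift operations) by a sorted list maintained with bisect.insort, so a query becomes an O(1) pop of the last (largest) element instead of a heap extraction, and no negation trick is needed.
import Mathlib
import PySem

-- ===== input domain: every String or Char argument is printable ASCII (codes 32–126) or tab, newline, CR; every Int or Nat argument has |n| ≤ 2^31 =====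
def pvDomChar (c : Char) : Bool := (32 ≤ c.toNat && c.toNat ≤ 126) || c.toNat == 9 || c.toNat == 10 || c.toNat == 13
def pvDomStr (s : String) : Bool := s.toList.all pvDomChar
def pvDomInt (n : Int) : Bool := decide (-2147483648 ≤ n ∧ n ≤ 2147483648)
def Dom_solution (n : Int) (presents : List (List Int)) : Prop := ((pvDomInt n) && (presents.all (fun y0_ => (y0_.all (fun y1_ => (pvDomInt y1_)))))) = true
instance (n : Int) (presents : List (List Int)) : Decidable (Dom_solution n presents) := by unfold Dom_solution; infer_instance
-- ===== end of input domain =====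

-- B replaces A's negated max-heap (heappush/heappop sift operations) by an ascending sorted
-- list maintained with bisect.insort, popping the last (largest) element on queries;
-- objective: alternative (no speed claim).

-- ===== PORT A =====
-- heapq.heappush / heappop are ported as a standard array binary min-heap over List Int
-- (sift-up on push, sift-down on pop, CPython's last-element trick on pop); the popped
-- values — the only part of the heap A's output observes — match CPython's heapq exactly.

-- swap the entries at positions i and j
def hswap (h : List Int) (i j : Nat) : List Int :=
  (h.set i (h.getD j 0)).set j (h.getD i 0)

@[simp] theorem length_hswap (h : List Int) (i j : Nat) : (hswap h i j).length = h.length := by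
  simp [hswap]

-- sift-up: bubble the entry at pos towards the root while smaller than its parent
def pushLoop (h : List Int) (pos : Nat) : List Int :=
  if hp : pos = 0 then h
  else
    let parent := (pos - 1) / 2
    if h.getD pos 0 < h.getD parent 0 then pushLoop (hswap h pos parent) parent else h
termination_by pos
decreasing_by omega

def heappush (h : List Int) (x : Int) : List Int := pushLoop (h ++ [x]) h.length

-- index of the smaller child of pos (right child wins only if strictly smaller; for equal
-- values CPython picks the right child — indistinguishable, the values are equal)
def childSel (h : List Int) (pos : Nat) : Nat :=
  if 2*pos+2 < h.length ∧ h.getD (2*pos+2) 0 < h.getD (2*pos+1) 0 then 2*pos+2 else 2*pos+1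

theorem childSel_range (h : List Int) (pos : Nat) (hc : 2*pos+1 < h.length) :
    pos < childSel h pos ∧ childSel h pos < h.length := by
  unfold childSel; split <;> omega

-- sift-down: push the entry at pos down while larger than its smaller child
def downLoop (h : List Int) (pos : Nat) : List Int :=
  if hc : 2*pos+1 < h.length then
    let c := childSel h pos
    if h.getD c 0 < h.getD pos 0 then downLoop (hswap h pos c) c else h
  else h
termination_by h.length - pos
decreasing_by
  have := childSel_range h pos hc
  simp only [length_hswap]; omega

-- CPython heappop: pop the last entry; if the heap is still nonempty, the root is returned
-- and the last entry is sifted down from the root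
def heappop (h : List Int) : Int × List Int :=
  let lastelt := h.getLast?.getD 0
  let rest := h.dropLast
  if rest = [] then (lastelt, [])
  else (rest.getD 0 0, downLoop (rest.set 0 lastelt) 0)

-- one iteration of A's loop over presents; state = (heap, answer)
-- row[0] (IndexError on an empty row, excluded by Pre_) is pyGetD row 0 0
def stepA (st : List Int × String) (row : List Int) : List Int × String :=
  if PySem.List.pyGetD row 0 0 = 0 then
    if st.1.length = 0 then (st.1, st.2 ++ "-1\n")
    else ((heappop st.1).2, st.2 ++ PySem.Int.toStr (-(heappop st.1).1) ++ "\n")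
  else ((PySem.List.slice row (some 1) none).foldl (fun hp present => heappush hp (-present)) st.1, st.2)

def solution (n : Int) (presents : List (List Int)) : String :=
  PySem.Str.slice (presents.foldl stepA ([], "")).2 none (some (-1))

-- ===== PORT B =====
-- bisect.insort on an Int list = insertion keeping the list sorted (List.orderedInsert;
-- for equal Int values the left/right insertion point yields the identical list)
def insort (lst : List Int) (x : Int) : List Int := List.orderedInsert (· ≤ ·) x lst

-- one iteration of B's loop; state = (sorted list, answer); lst.pop() = last element
def stepB (st : List Int × String) (row : List Int) : List Int × String :=
  if PySem.List.pyGetD row 0 0 = 0 then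
    if st.1 ≠ [] then (st.1.dropLast, st.2 ++ PySem.Int.toStr (PySem.List.pyGetD st.1 (-1) 0) ++ "\n")
    else (st.1, st.2 ++ "-1\n")
  else ((PySem.List.slice row (some 1) none).foldl insort st.1, st.2)

def solution_alt (n : Int) (presents : List (List Int)) : String :=
  PySem.Str.slice (presents.foldl stepB ([], "")).2 none (some (-1))

-- ===== PRECONDITION & SPEC =====
-- Pre_ excludes inputs containing an empty row: there row[0] raises IndexError in A (and in B).
def Pre_solution (n : Int) (presents : List (List Int)) : Prop := ∀ row ∈ presents, row ≠ []
instance (n : Int) (presents : List (List Int)) : Decidable (Pre_solution n presents) := by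
  unfold Pre_solution; infer_instance

def pvWitness_solution : Int × List (List Int) := (4, [[2, 5, 3], [0], [0], [0]])

def Spec_solution (n : Int) (presents : List (List Int)) (out : String) : Prop := out = solution_alt n presents
instance (n : Int) (presents : List (List Int)) (out : String) : Decidable (Spec_solution n presents out) := by unfold Spec_solution; infer_instance

-- ===== CLAIM (what is proved, stated in full; the proofs are below) =====
def Claim_equal_solution : Prop := ∀ (n : Int) (presents : List (List Int)), Dom_solution n presents → Pre_solution n presents → Spec_solution n presents (solution n presents)

-- ===== LEMMAS AND PROOFS =====

-- the binary min-heap invariant: every non-root entry is ≥ its parent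
def HInv (h : List Int) : Prop := ∀ i, 1 ≤ i → i < h.length → h.getD ((i-1)/2) 0 ≤ h.getD i 0

theorem getD_set (l : List Int) (i j : Nat) (x : Int) :
    (l.set i x).getD j 0 = if j = i ∧ i < l.length then x else l.getD j 0 := by
  simp [List.getD, List.getElem?_set]
  split_ifs with h1 h2 h3 <;> simp_all

theorem getD_hswap (l : List Int) (i j k : Nat) (hi : i < l.length) (hj : j < l.length) :
    (hswap l i j).getD k 0 =
      if k = j then l.getD i 0 else if k = i then l.getD j 0 else l.getD k 0 := by
  simp only [hswap, getD_set, List.length_set]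
  split_ifs <;> simp_all

theorem cons_getD_set_perm (t : List Int) (k : Nat) (a : Int) (hk : k < t.length) :
    (t.getD k 0 :: t.set k a).Perm (a :: t) := by
  induction t generalizing k with
  | nil => simp at hk
  | cons b s ih =>
    cases k with
    | zero => simpa [List.getD] using List.Perm.swap a b s
    | succ m =>
      have hm : m < s.length := by simpa using hk
      exact ((List.Perm.swap b (s.getD m 0) (s.set m a)).trans ((ih m hm).cons b)).trans
        (List.Perm.swap a b s)

theorem hswap_perm (l : List Int) (i j : Nat) (hi : i < l.length) (hj : j < l.length) :
    (hswap l i j).Perm l := by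
  have hj' : j < (l.set i (l.getD j 0)).length := by simpa using hj
  have h3 := cons_getD_set_perm (l.set i (l.getD j 0)) j (l.getD i 0) hj'
  have hg : (l.set i (l.getD j 0)).getD j 0 = l.getD j 0 := by
    rw [getD_set]; split_ifs with h <;> simp_all
  rw [hg] at h3
  have h1 := cons_getD_set_perm l i (l.getD j 0) hi
  exact (h3.trans h1).cons_inv

theorem pushLoop_perm (h : List Int) (pos : Nat) (hp : pos < h.length) :
    (pushLoop h pos).Perm h := by
  induction h, pos using pushLoop.induct with
  | case1 h => simp [pushLoop]
  | case2 h pos hne parent hlt ih =>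
    rw [pushLoop, dif_neg hne, if_pos (show h.getD pos 0 < h.getD ((pos - 1) / 2) 0 from hlt)]
    have hpar : (pos - 1) / 2 < h.length := by omega
    exact (ih (by simpa using hpar)).trans (hswap_perm h pos ((pos - 1) / 2) hp hpar)
  | case3 h pos hne parent hlt =>
    rw [pushLoop, dif_neg hne, if_neg (show ¬ h.getD pos 0 < h.getD ((pos - 1) / 2) 0 from hlt)]

-- sift-up invariant: heap property everywhere except at pos, and pos's parent is already
-- ≤ pos's children
def QInv (h : List Int) (pos : Nat) : Prop :=
  (∀ i, 1 ≤ i → i < h.length → i ≠ pos → h.getD ((i-1)/2) 0 ≤ h.getD i 0) ∧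
  (∀ j, j < h.length → (j-1)/2 = pos → 1 ≤ j → 1 ≤ pos → h.getD ((pos-1)/2) 0 ≤ h.getD j 0)

theorem pushLoop_hinv (h : List Int) (pos : Nat) (hp : pos < h.length) (hq : QInv h pos) :
    HInv (pushLoop h pos) := by
  induction h, pos using pushLoop.induct with
  | case1 h =>
    have e : pushLoop h 0 = h := by simp [pushLoop]
    rw [e]
    intro i h1 h2
    exact hq.1 i h1 h2 (by omega)
  | case2 h pos hne parent hlt ih =>
    rw [pushLoop, dif_neg hne, if_pos (show h.getD pos 0 < h.getD ((pos - 1) / 2) 0 from hlt)]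
    have hlt' : h.getD pos 0 < h.getD ((pos - 1) / 2) 0 := hlt
    have hpar : (pos - 1) / 2 < h.length := by omega
    have hlen : (hswap h pos ((pos - 1) / 2)).length = h.length := length_hswap h pos ((pos - 1) / 2)
    have G : ∀ k, (hswap h pos ((pos - 1) / 2)).getD k 0 =
        if k = (pos - 1) / 2 then h.getD pos 0
        else if k = pos then h.getD ((pos - 1) / 2) 0 else h.getD k 0 :=
      fun k => getD_hswap h pos ((pos - 1) / 2) k hp hpar
    apply ih (by simp only [length_hswap]; omega)
    constructor
    · intro i h1 h2 hip
      rw [hlen] at h2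
      rw [G, G]
      by_cases hipos : i = pos
      · subst hipos
        rw [if_pos rfl, if_neg (by omega), if_pos rfl]
        exact hlt'.le
      · rw [if_neg hip, if_neg hipos]
        by_cases hc1 : (i - 1) / 2 = (pos - 1) / 2
        · rw [if_pos hc1]
          have h4 := hq.1 i h1 h2 hipos
          rw [hc1] at h4
          exact le_trans hlt'.le h4
        · rw [if_neg hc1]
          by_cases hc2 : (i - 1) / 2 = pos
          · rw [if_pos hc2]
            exact hq.2 i h2 hc2 h1 (by omega)
          · rw [if_neg hc2]
            exact hq.1 i h1 h2 hipos
    · intro j hj hjp hj1 hp1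
      rw [hlen] at hj
      rw [G, G]
      rw [if_neg (by omega), if_neg (by omega)]
      by_cases hjpos : j = pos
      · rw [if_neg (by omega), if_pos hjpos]
        exact hq.1 ((pos - 1) / 2) hp1 hpar (by omega)
      · rw [if_neg (by omega), if_neg hjpos]
        have h4 := hq.1 j hj1 hj hjpos
        rw [hjp] at h4
        exact le_trans (hq.1 ((pos - 1) / 2) hp1 hpar (by omega)) h4
  | case3 h pos hne parent hlt =>
    rw [pushLoop, dif_neg hne, if_neg (show ¬ h.getD pos 0 < h.getD ((pos - 1) / 2) 0 from hlt)]
    intro i h1 h2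
    by_cases hipos : i = pos
    · subst hipos
      exact not_lt.mp hlt
    · exact hq.1 i h1 h2 hipos

theorem heappush_perm (h : List Int) (x : Int) : (heappush h x).Perm (x :: h) := by
  have hp : h.length < (h ++ [x]).length := by simp
  exact (pushLoop_perm (h ++ [x]) h.length hp).trans (List.perm_append_singleton x h)

theorem heappush_hinv (h : List Int) (x : Int) (hh : HInv h) : HInv (heappush h x) := by
  apply pushLoop_hinv (h ++ [x]) h.length (by simp)
  constructor
  · intro i h1 h2 hip
    have hi : i < h.length := by simp at h2; omega
    rw [List.getD_append _ _ _ _ hi, List.getD_append _ _ _ _ (by omega)]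
    exact hh i h1 hi
  · intro j hj hjp hj1 hlen1
    simp at hj
    omega

-- sift-down invariant: heap property on every edge not leaving pos, and pos's parent is
-- already ≤ pos's children
def PInv (h : List Int) (pos : Nat) : Prop :=
  (∀ i, 1 ≤ i → i < h.length → (i-1)/2 ≠ pos → h.getD ((i-1)/2) 0 ≤ h.getD i 0) ∧
  (∀ j, 1 ≤ j → j < h.length → (j-1)/2 = pos → 1 ≤ pos → h.getD ((pos-1)/2) 0 ≤ h.getD j 0)

theorem childSel_min (h : List Int) (pos : Nat) (hc : 2*pos+1 < h.length) :
    ∀ j, j < h.length → (j-1)/2 = pos → 1 ≤ j → h.getD (childSel h pos) 0 ≤ h.getD j 0 := by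
  intro j hj hjp hj1
  unfold childSel
  by_cases hsel : 2*pos+2 < h.length ∧ h.getD (2*pos+2) 0 < h.getD (2*pos+1) 0
  · rw [if_pos hsel]
    have hor : j = 2*pos+1 ∨ j = 2*pos+2 := by omega
    rcases hor with rfl | rfl
    · exact hsel.2.le
    · exact le_refl _
  · rw [if_neg hsel]
    have hsel' : h.getD (2*pos+1) 0 ≤ h.getD (2*pos+2) 0 ∨ ¬ 2*pos+2 < h.length := by
      by_cases hl : 2*pos+2 < h.length
      · exact Or.inl (not_lt.mp (fun hlt2 => hsel ⟨hl, hlt2⟩))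
      · exact Or.inr hl
    have hor : j = 2*pos+1 ∨ j = 2*pos+2 := by omega
    rcases hor with rfl | rfl
    · exact le_refl _
    · rcases hsel' with h5 | h5
      · exact h5
      · exact absurd hj h5

theorem downLoop_perm (h : List Int) (pos : Nat) : (downLoop h pos).Perm h := by
  induction h, pos using downLoop.induct with
  | case1 h pos hc c hlt ih =>
    rw [downLoop, dif_pos hc, if_pos (show h.getD (childSel h pos) 0 < h.getD pos 0 from hlt)]
    have hcr := childSel_range h pos hc
    exact ih.trans (hswap_perm h pos (childSel h pos) (by omega) hcr.2)
  | case2 h pos hc c hlt =>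
    rw [downLoop, dif_pos hc, if_neg (show ¬ h.getD (childSel h pos) 0 < h.getD pos 0 from hlt)]
  | case3 h pos hc =>
    rw [downLoop, dif_neg hc]

theorem downLoop_hinv (h : List Int) (pos : Nat) (hq : PInv h pos) : HInv (downLoop h pos) := by
  induction h, pos using downLoop.induct with
  | case1 h pos hc c hlt ih =>
    rw [downLoop, dif_pos hc, if_pos (show h.getD (childSel h pos) 0 < h.getD pos 0 from hlt)]
    have hcr := childSel_range h pos hc
    have hcv : childSel h pos = 2*pos+1 ∨ childSel h pos = 2*pos+2 := by
      unfold childSel; split <;> simp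
    have hpos : pos < h.length := by omega
    have hlt' : h.getD (childSel h pos) 0 < h.getD pos 0 := hlt
    have hmin := childSel_min h pos hc
    have hlen : (hswap h pos (childSel h pos)).length = h.length := length_hswap _ _ _
    have G : ∀ k, (hswap h pos (childSel h pos)).getD k 0 =
        if k = childSel h pos then h.getD pos 0
        else if k = pos then h.getD (childSel h pos) 0 else h.getD k 0 :=
      fun k => getD_hswap h pos (childSel h pos) k hpos hcr.2
    apply ih
    show PInv (hswap h pos (childSel h pos)) (childSel h pos)
    constructor
    · intro i h1 h2 hip
      rw [hlen] at h2
      rw [G, G]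
      by_cases hc1 : (i-1)/2 = pos
      · rw [if_neg (by omega), if_pos hc1]
        by_cases hic : i = childSel h pos
        · rw [if_pos hic]
          exact hlt'.le
        · rw [if_neg hic, if_neg (by omega)]
          exact hmin i h2 hc1 h1
      · by_cases hi_pos : i = pos
        · rw [hi_pos]
          rw [if_neg (by omega), if_neg (by omega), if_neg (by omega), if_pos rfl]
          exact hq.2 (childSel h pos) (by omega) hcr.2 (by omega) (by omega)
        · rw [if_neg hip, if_neg hc1]
          by_cases hic : i = childSel h pos
          · omega
          · rw [if_neg hic, if_neg hi_pos]
            exact hq.1 i h1 h2 hc1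
    · intro j hj1 hj hjc hc1'
      rw [hlen] at hj
      have hcp : (childSel h pos - 1)/2 = pos := by omega
      rw [G, G, hcp]
      rw [if_neg (by omega), if_pos rfl, if_neg (by omega), if_neg (by omega)]
      have h4 := hq.1 j hj1 hj (by omega)
      rw [hjc] at h4
      exact h4
  | case2 h pos hc c hlt =>
    rw [downLoop, dif_pos hc, if_neg (show ¬ h.getD (childSel h pos) 0 < h.getD pos 0 from hlt)]
    intro i h1 h2
    by_cases hcase : (i-1)/2 = pos
    · rw [hcase]
      exact le_trans (not_lt.mp hlt) (childSel_min h pos hc i h2 hcase h1)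
    · exact hq.1 i h1 h2 hcase
  | case3 h pos hc =>
    rw [downLoop, dif_neg hc]
    intro i h1 h2
    by_cases hcase : (i-1)/2 = pos
    · omega
    · exact hq.1 i h1 h2 hcase

theorem hinv_root_min (h : List Int) (hh : HInv h) : ∀ i, i < h.length → h.getD 0 0 ≤ h.getD i 0 := by
  intro i
  induction i using Nat.strong_induction_on with
  | _ i ih =>
    intro hi
    rcases Nat.eq_zero_or_pos i with rfl | h1
    · exact le_refl _
    · exact le_trans (ih ((i-1)/2) (by omega) (by omega)) (hh i h1 hi)

theorem hinv_min_mem (h : List Int) (hh : HInv h) (y : Int) (hy : y ∈ h) : h.getD 0 0 ≤ y := by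
  obtain ⟨i, hi, rfl⟩ := List.mem_iff_getElem.mp hy
  rw [← List.getD_eq_getElem h 0 hi]
  exact hinv_root_min h hh i hi

theorem heappop_spec (h : List Int) (hne : h ≠ []) (hh : HInv h) :
    (heappop h).1 = h.getD 0 0 ∧ HInv (heappop h).2 ∧ ((heappop h).1 :: (heappop h).2).Perm h := by
  by_cases hr : h.dropLast = []
  · obtain ⟨a, rfl⟩ : ∃ a, h = [a] := by
      cases h with
      | nil => exact absurd rfl hne
      | cons b t =>
        cases t with
        | nil => exact ⟨b, rfl⟩
        | cons c u => simp [List.dropLast] at hr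
    refine ⟨by simp [heappop], ?_, by simp [heappop]⟩
    intro i h1 h2
    simp [heappop] at h2
  · have h0 : 0 < h.dropLast.length := List.length_pos_iff.mpr hr
    have hpop : heappop h = (h.dropLast.getD 0 0,
        downLoop ((h.dropLast).set 0 (h.getLast?.getD 0)) 0) := by
      simp [heappop, hr]
    have hne' : h.getLast? = some (h.getLast hne) := List.getLast?_eq_getLast_of_ne_nil hne
    have hdec : h.dropLast ++ [h.getLast?.getD 0] = h := by
      rw [hne']
      exact List.dropLast_append_getLast hne
    have hdlen : h.dropLast.length + 1 = h.length := by
      have := congrArg List.length hdec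
      simpa using this
    have hgdd : ∀ k, k < h.dropLast.length → h.dropLast.getD k 0 = h.getD k 0 := by
      intro k hk
      conv_rhs => rw [← hdec]
      rw [List.getD_append _ _ _ _ hk]
    refine ⟨by rw [hpop]; exact hgdd 0 h0, ?_, ?_⟩
    · rw [hpop]
      apply downLoop_hinv
      constructor
      · intro i h1 h2 hip
        have hi2 : i < h.dropLast.length := by simpa using h2
        rw [getD_set, getD_set]
        rw [if_neg (by omega), if_neg (by omega)]
        rw [hgdd i hi2, hgdd ((i-1)/2) (by omega)]
        exact hh i h1 (by omega)
      · intro j hj1 hj hjp hp0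
        omega
    · rw [hpop]
      have p1 : (h.dropLast.getD 0 0 :: downLoop ((h.dropLast).set 0 (h.getLast?.getD 0)) 0).Perm
          (h.dropLast.getD 0 0 :: (h.dropLast).set 0 (h.getLast?.getD 0)) :=
        (downLoop_perm _ _).cons _
      have p2 := cons_getD_set_perm h.dropLast 0 (h.getLast?.getD 0) h0
      have p3 : (h.getLast?.getD 0 :: h.dropLast).Perm h := by
        conv_rhs => rw [← hdec]
        exact (List.perm_append_singleton _ _).symm
      exact (p1.trans p2).trans p3

-- the coupling between A's heap and B's sorted list
def HRel (heap lst : List Int) : Prop :=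
  HInv heap ∧ heap.Perm (lst.map (fun x => -x)) ∧ List.Pairwise (· ≤ ·) lst

theorem sorted_le_getLast (lst : List Int) (hs : List.Pairwise (· ≤ ·) lst) (a : Int) (ha : a ∈ lst) :
    a ≤ lst.getLast?.getD 0 := by
  induction lst with
  | nil => simp at ha
  | cons b t ih =>
    cases t with
    | nil => simp_all
    | cons c t' =>
      rw [List.getLast?_cons_cons]
      rcases List.mem_cons.mp ha with rfl | hat
      · have hmem : (c :: t').getLast?.getD 0 ∈ c :: t' := by
          rw [List.getLast?_eq_getLast_of_ne_nil (List.cons_ne_nil c t')]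
          simp [List.getLast_mem]
        exact List.rel_of_pairwise_cons hs hmem
      · exact ih hs.of_cons hat

theorem rel_push (heap lst : List Int) (hr : HRel heap lst) (x : Int) :
    HRel (heappush heap (-x)) (insort lst x) := by
  refine ⟨heappush_hinv heap (-x) hr.1, ?_, ?_⟩
  · have p1 : (heappush heap (-x)).Perm ((-x) :: heap) := heappush_perm heap (-x)
    have p2 : ((-x) :: heap).Perm ((-x) :: lst.map (fun y => -y)) := hr.2.1.cons _
    have p3 : ((List.orderedInsert (· ≤ ·) x lst).map (fun y => -y)).Perm
        ((-x) :: lst.map (fun y => -y)) := (List.perm_orderedInsert _ x lst).map _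
    exact (p1.trans p2).trans p3.symm
  · exact hr.2.2.orderedInsert x lst

theorem rel_pushes (row : List Int) (heap lst : List Int) (hr : HRel heap lst) :
    HRel (row.foldl (fun hp present => heappush hp (-present)) heap) (row.foldl insort lst) := by
  induction row generalizing heap lst with
  | nil => exact hr
  | cons x xs ih =>
    simp only [List.foldl_cons]
    exact ih _ _ (rel_push heap lst hr x)

theorem rel_pop (heap lst : List Int) (hr : HRel heap lst) (hne : heap ≠ []) :
    lst ≠ [] ∧ -(heappop heap).1 = PySem.List.pyGetD lst (-1) 0 ∧ HRel (heappop heap).2 lst.dropLast := by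
  obtain ⟨hh, hperm, hsort⟩ := hr
  have hlne : lst ≠ [] := by
    intro h0
    rw [h0] at hperm
    simp at hperm
    exact hne hperm
  have spec := heappop_spec heap hne hh
  have hroot_mem : heap.getD 0 0 ∈ heap := by
    have h0 : 0 < heap.length := List.length_pos_iff.mpr hne
    rw [List.getD_eq_getElem heap 0 h0]
    exact List.getElem_mem h0
  have hmem2 : heap.getD 0 0 ∈ lst.map (fun y => -y) := hperm.mem_iff.mp hroot_mem
  obtain ⟨a, ha, haeq⟩ := List.mem_map.mp hmem2
  have hglast : lst.getLast? = some (lst.getLast hlne) := List.getLast?_eq_getLast_of_ne_nil hlne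
  have hlast_mem : lst.getLast?.getD 0 ∈ lst := by
    rw [hglast]
    exact List.getLast_mem hlne
  have h2 : heap.getD 0 0 ≤ -(lst.getLast?.getD 0) := by
    apply hinv_min_mem heap hh
    apply hperm.mem_iff.mpr
    exact List.mem_map.mpr ⟨lst.getLast?.getD 0, hlast_mem, rfl⟩
  have hroot : heap.getD 0 0 = -(lst.getLast?.getD 0) := by
    have h3 : a ≤ lst.getLast?.getD 0 := sorted_le_getLast lst hsort a ha
    omega
  have hval : -(heappop heap).1 = PySem.List.pyGetD lst (-1) 0 := by
    rw [spec.1, hroot, PySem.List.pyGetD_neg_one lst 0 hlne, hglast]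
    simp
  refine ⟨hlne, hval, spec.2.1, ?_, hsort.sublist (List.dropLast_sublist lst)⟩
  have hdec : lst.dropLast ++ [lst.getLast?.getD 0] = lst := by
    rw [hglast]
    exact List.dropLast_append_getLast hlne
  have p1 : ((heappop heap).1 :: (heappop heap).2).Perm (lst.map (fun y => -y)) :=
    spec.2.2.trans hperm
  have p2 : (lst.map (fun y => -y)).Perm
      ((heappop heap).1 :: lst.dropLast.map (fun y => -y)) := by
    conv_lhs => rw [← hdec]
    rw [List.map_append]
    refine (List.perm_append_singleton _ _).trans ?_
    have hb : ((fun y => -y) (lst.getLast?.getD 0) : Int) = (heappop heap).1 := by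
      show -(lst.getLast?.getD 0) = (heappop heap).1
      rw [spec.1, hroot]
    rw [hb]
  exact (p1.trans p2).cons_inv

theorem fold_rel (rows : List (List Int)) (heap lst : List Int) (ans : String) (hr : HRel heap lst) :
    HRel (rows.foldl stepA (heap, ans)).1 (rows.foldl stepB (lst, ans)).1 ∧
      (rows.foldl stepA (heap, ans)).2 = (rows.foldl stepB (lst, ans)).2 := by
  induction rows generalizing heap lst ans with
  | nil => exact ⟨hr, rfl⟩
  | cons row rows ih =>
    simp only [List.foldl_cons]
    by_cases hq0 : PySem.List.pyGetD row 0 0 = 0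
    · by_cases hemp : heap.length = 0
      · have hhe : heap = [] := List.length_eq_zero_iff.mp hemp
        have hle : lst = [] := by
          have := hr.2.1.length_eq
          rw [hhe] at this
          simp at this
          exact (List.length_eq_zero_iff).mp this.symm
        rw [show stepA (heap, ans) row = (heap, ans ++ "-1\n") by
              simp only [stepA, if_pos hq0, if_pos hemp],
            show stepB (lst, ans) row = (lst, ans ++ "-1\n") by
              simp only [stepB, if_pos hq0]
              rw [if_neg (by simp [hle])]]
        exact ih heap lst _ hr
      · have hne : heap ≠ [] := by
          intro h0; rw [h0] at hemp; simp at hemp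
        obtain ⟨hlne, hval, hrel⟩ := rel_pop heap lst hr hne
        rw [show stepA (heap, ans) row
              = ((heappop heap).2, ans ++ PySem.Int.toStr (-(heappop heap).1) ++ "\n") by
              simp only [stepA, if_pos hq0, if_neg hemp],
            show stepB (lst, ans) row
              = (lst.dropLast, ans ++ PySem.Int.toStr (PySem.List.pyGetD lst (-1) 0) ++ "\n") by
              simp only [stepB, if_pos hq0]
              rw [if_pos hlne]]
        rw [← hval]
        exact ih _ _ _ hrel
    · rw [show stepA (heap, ans) row
            = ((PySem.List.slice row (some 1) none).foldl
                (fun hp present => heappush hp (-present)) heap, ans) by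
            simp only [stepA, if_neg hq0],
          show stepB (lst, ans) row
            = ((PySem.List.slice row (some 1) none).foldl insort lst, ans) by
            simp only [stepB, if_neg hq0]]
      exact ih _ _ _ (rel_pushes _ heap lst hr)

-- ===== VERDICT (by name: the statement is the Claim_ definition above) =====
theorem solution_spec : Claim_equal_solution := by
  intro n presents _ _
  unfold Spec_solution solution solution_alt
  have h := fold_rel presents [] [] "" ⟨by intro i h1 h2; simp at h2, by simp, List.Pairwise.nil⟩
  rw [h.2]
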